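-- pv_equiv track=rewrite | github.com/zwdnet/MyQuant | 44/08/dinner.py | removeBadCombinations2
-- ===== SOURCE A (Python) =====
-- def removeBadCombinations2(allCombL, dislikePairs):
--     allGoodCombinations = []
--     for i in allCombL:
--         good = True
--         for j in dislikePairs:
--             if member(j[0], i) and member(j[1], i):
--                 good = False
--         if good:
--             allGoodCombinations.append(i)
--     return allGoodCombinations
--
-- def member(guest, gtuples):
--     for g in gtuples:
--         if guest == g[0]:
--             return True
--     return False
-- ===== SOURCE B (Python) =====
-- def removeBadCombinations2(allCombL, dislikePairs):
--     # Build an inverted index: first-element -> set of combination indices containing it,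
--     # then mark bad indices by intersecting per dislike pair, and keep the rest in order.
--     index = {}
--     k = 0
--     for comb in allCombL:
--         for g in comb:
--             s = index.get(g[0], set())
--             s.add(k)
--             index[g[0]] = s
--         k += 1
--     empty = set()
--     bad = set()
--     for p in dislikePairs:
--         bad |= index.get(p[0], empty) & index.get(p[1], empty)
--     out = []
--     k = 0
--     for comb in allCombL:
--         if k not in bad:
--             out.append(comb)
--         k += 1
--     return out
-- ===== Notes on version B (the rewrite author's own statement) =====
-- stated objective: alternative
-- what changed: Replaces A's per-combination rescan of all dislike pairs (calling member twice per pair) by an inverted index from first elements to sets of combination indices, built once, with bad indices computed by per-pair set intersections and a final in-order keep pass.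
import Mathlib
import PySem

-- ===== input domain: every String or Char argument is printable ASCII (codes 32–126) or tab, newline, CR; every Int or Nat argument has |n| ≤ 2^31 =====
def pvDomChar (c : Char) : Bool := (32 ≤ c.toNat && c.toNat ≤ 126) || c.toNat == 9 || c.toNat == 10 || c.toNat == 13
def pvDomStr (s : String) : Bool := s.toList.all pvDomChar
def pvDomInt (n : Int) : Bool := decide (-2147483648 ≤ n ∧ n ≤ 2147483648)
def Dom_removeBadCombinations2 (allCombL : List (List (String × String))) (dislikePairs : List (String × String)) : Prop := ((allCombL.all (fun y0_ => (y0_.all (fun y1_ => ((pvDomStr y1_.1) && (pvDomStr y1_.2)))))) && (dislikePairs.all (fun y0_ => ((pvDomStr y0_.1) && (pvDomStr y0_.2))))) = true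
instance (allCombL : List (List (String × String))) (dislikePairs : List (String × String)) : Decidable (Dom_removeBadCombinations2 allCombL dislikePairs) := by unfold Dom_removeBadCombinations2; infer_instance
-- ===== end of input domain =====

-- B replaces A's per-combination × per-pair rescans by one inverted index (first element → set of
-- combination indices) built once, pairwise set intersections, and an in-order keep pass (objective: alternative).

-- ===== PORT A =====
-- member(guest, gtuples): loop with early return
def pvMember (guest : String) (gtuples : List (String × String)) : Bool :=
  match gtuples with
  | [] => false
  | g :: rest => if guest == g.1 then true else pvMember guest rest

def removeBadCombinations2 (allCombL : List (List (String × String))) (dislikePairs : List (String × String)) : List (List (String × String)) :=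
  allCombL.foldl (fun acc i =>
    let good := dislikePairs.foldl
      (fun good j => if pvMember j.1 i && pvMember j.2 i then false else good) true
    if good then acc ++ [i] else acc) []

-- ===== PORT B =====
-- inner loop of the index build: for g in comb: index[g[0]] = index.get(g[0], set()) ∪ {k}
def pvAddComb (d : PySem.Dict String (PySem.Set Nat)) (k : Nat) (comb : List (String × String)) : PySem.Dict String (PySem.Set Nat) :=
  comb.foldl (fun d g => d.insert g.1 (PySem.Set.add (d.getD g.1 PySem.Set.empty) k)) d

-- outer loop of the index build, k counting up from s
def pvIndex (L : List (List (String × String))) (s : Nat) (d : PySem.Dict String (PySem.Set Nat)) : PySem.Dict String (PySem.Set Nat) :=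
  match L with
  | [] => d
  | c :: rest => pvIndex rest (s + 1) (pvAddComb d s c)

-- bad |= index.get(p[0], empty) & index.get(p[1], empty)
def pvBad (idx : PySem.Dict String (PySem.Set Nat)) (dislikePairs : List (String × String)) : PySem.Set Nat :=
  dislikePairs.foldl (fun bad p =>
    PySem.Set.union bad (PySem.Set.inter (idx.getD p.1 PySem.Set.empty) (idx.getD p.2 PySem.Set.empty))) PySem.Set.empty

-- final pass: keep combinations whose index is not in bad
def pvKeep (L : List (List (String × String))) (s : Nat) (bad : PySem.Set Nat) : List (List (String × String)) :=
  match L with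
  | [] => []
  | c :: rest => if PySem.Set.contains bad s then pvKeep rest (s + 1) bad else c :: pvKeep rest (s + 1) bad

def removeBadCombinations2_alt (allCombL : List (List (String × String))) (dislikePairs : List (String × String)) : List (List (String × String)) :=
  pvKeep allCombL 0 (pvBad (pvIndex allCombL 0 PySem.Dict.empty) dislikePairs)

-- ===== PRECONDITION & SPEC =====
def Spec_removeBadCombinations2 (allCombL : List (List (String × String))) (dislikePairs : List (String × String)) (out : List (List (String × String))) : Prop := out = removeBadCombinations2_alt allCombL dislikePairs
instance (allCombL : List (List (String × String))) (dislikePairs : List (String × String)) (out : List (List (String × String))) : Decidable (Spec_removeBadCombinations2 allCombL dislikePairs out) := by unfold Spec_removeBadCombinations2; infer_instance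

-- ===== CLAIM (what is proved, stated in full; the proofs are below) =====
def Claim_equal_removeBadCombinations2 : Prop := ∀ (allCombL : List (List (String × String))) (dislikePairs : List (String × String)), Dom_removeBadCombinations2 allCombL dislikePairs → Spec_removeBadCombinations2 allCombL dislikePairs (removeBadCombinations2 allCombL dislikePairs)

-- ===== LEMMAS AND PROOFS =====

-- the predicate both sides agree on: combination i is bad
def pvBadComb (dislikePairs : List (String × String)) (i : List (String × String)) : Bool :=
  dislikePairs.any (fun j => pvMember j.1 i && pvMember j.2 i)

lemma pvFlag_eq (dislikePairs : List (String × String)) (i : List (String × String)) :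
    ∀ b : Bool, dislikePairs.foldl
      (fun good j => if pvMember j.1 i && pvMember j.2 i then false else good) b
      = (b && !pvBadComb dislikePairs i) := by
  induction dislikePairs with
  | nil => intro b; simp [pvBadComb]
  | cons p rest ih =>
    intro b
    simp only [List.foldl_cons, pvBadComb, List.any_cons, ih]
    by_cases h : (pvMember p.1 i && pvMember p.2 i) = true <;>
      simp [h]

lemma A_eq_filter (allCombL : List (List (String × String))) (dislikePairs : List (String × String)) :
    removeBadCombinations2 allCombL dislikePairs
      = allCombL.filter (fun i => !pvBadComb dislikePairs i) := by
  unfold removeBadCombinations2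
  simp only [pvFlag_eq, Bool.true_and]
  exact PySem.List.foldl_append_if_eq_filter _ _ _

lemma pvAddComb_mem (k' : Nat) (x : String) :
    ∀ (comb : List (String × String)) (d : PySem.Dict String (PySem.Set Nat)) (k : Nat),
      k' ∈ (pvAddComb d k comb).getD x PySem.Set.empty
        ↔ k' ∈ d.getD x PySem.Set.empty ∨ (k' = k ∧ pvMember x comb = true) := by
  intro comb
  induction comb with
  | nil => intro d k; simp [pvAddComb, pvMember]
  | cons g rest ih =>
    intro d k
    show k' ∈ (pvAddComb (d.insert g.1 _) k rest).getD x PySem.Set.empty ↔ _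
    rw [ih]
    rw [PySem.Dict.getD_insert]
    by_cases hx : x = g.1
    · subst hx
      simp only [PySem.Set.mem_add, pvMember, beq_self_eq_true, if_pos]
      tauto
    · have hbe : (x == g.1) = false := by simp [hx]
      simp only [if_neg hx, pvMember, hbe, Bool.false_eq_true, if_false]

lemma pvIndex_mem (k : Nat) (x : String) :
    ∀ (L : List (List (String × String))) (s : Nat) (d : PySem.Dict String (PySem.Set Nat)),
      k ∈ (pvIndex L s d).getD x PySem.Set.empty
        ↔ k ∈ d.getD x PySem.Set.empty
          ∨ ∃ j, ∃ h : j < L.length, k = s + j ∧ pvMember x L[j] = true := by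
  intro L
  induction L with
  | nil => intro s d; simp [pvIndex]
  | cons c rest ih =>
    intro s d
    show k ∈ (pvIndex rest (s + 1) (pvAddComb d s c)).getD x PySem.Set.empty ↔ _
    rw [ih, pvAddComb_mem]
    constructor
    · rintro ((h | ⟨hk, hm⟩) | ⟨j, hj, hk, hm⟩)
      · exact Or.inl h
      · exact Or.inr ⟨0, by simp, by omega, hm⟩
      · exact Or.inr ⟨j + 1, by simpa using hj, by omega, by simpa using hm⟩
    · rintro (h | ⟨j, hj, hk, hm⟩)
      · exact Or.inl (Or.inl h)
      · match j with
        | 0 => exact Or.inl (Or.inr ⟨by omega, by simpa using hm⟩)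
        | j + 1 => exact Or.inr ⟨j, by simpa using hj, by omega, by simpa using hm⟩

lemma pvBad_mem (idx : PySem.Dict String (PySem.Set Nat)) (k : Nat) :
    ∀ (pairs : List (String × String)) (b : PySem.Set Nat),
      k ∈ pairs.foldl (fun bad p =>
          PySem.Set.union bad (PySem.Set.inter (idx.getD p.1 PySem.Set.empty) (idx.getD p.2 PySem.Set.empty))) b
        ↔ k ∈ b ∨ ∃ p ∈ pairs, k ∈ idx.getD p.1 PySem.Set.empty ∧ k ∈ idx.getD p.2 PySem.Set.empty := by
  intro pairs
  induction pairs with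
  | nil => intro b; simp
  | cons p rest ih =>
    intro b
    simp only [List.foldl_cons, ih, PySem.Set.mem_union, PySem.Set.mem_inter, List.mem_cons]
    constructor
    · rintro ((h | h) | ⟨q, hq, h⟩)
      · exact Or.inl h
      · exact Or.inr ⟨p, Or.inl rfl, h⟩
      · exact Or.inr ⟨q, Or.inr hq, h⟩
    · rintro (h | ⟨q, (rfl | hq), h⟩)
      · exact Or.inl (Or.inl h)
      · exact Or.inl (Or.inr h)
      · exact Or.inr ⟨q, hq, h⟩

lemma pvKeep_eq_filter (P : List (String × String) → Bool) :
    ∀ (L : List (List (String × String))) (s : Nat) (bad : PySem.Set Nat),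
      (∀ j (h : j < L.length), PySem.Set.contains bad (s + j) = !P L[j]) →
      pvKeep L s bad = L.filter P := by
  intro L
  induction L with
  | nil => intro s bad h; simp [pvKeep]
  | cons c rest ih =>
    intro s bad h
    have h0 : PySem.Set.contains bad s = !P c := by
      have := h 0 (by simp); simpa using this
    show (if PySem.Set.contains bad s then _ else _) = _
    rw [h0]
    have hrest : pvKeep rest (s + 1) bad = rest.filter P := by
      apply ih
      intro j hj
      have := h (j + 1) (by simpa using hj)
      simpa [Nat.add_assoc, Nat.add_comm 1 j] using this
    cases hP : P c <;> simp [hP, hrest]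

lemma B_eq_filter (allCombL : List (List (String × String))) (dislikePairs : List (String × String)) :
    removeBadCombinations2_alt allCombL dislikePairs
      = allCombL.filter (fun i => !pvBadComb dislikePairs i) := by
  unfold removeBadCombinations2_alt
  apply pvKeep_eq_filter
  intro j hj
  have hmem : PySem.Set.contains (pvBad (pvIndex allCombL 0 PySem.Dict.empty) dislikePairs) (0 + j) = true
      ↔ pvBadComb dislikePairs allCombL[j] = true := by
    rw [PySem.Set.contains_iff]
    unfold pvBad
    rw [pvBad_mem]
    constructor
    · rintro (h | ⟨p, hp, h1, h2⟩)
      · exact absurd h (List.not_mem_nil)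
      rw [pvIndex_mem] at h1 h2
      rcases h1 with h1 | ⟨j1, hj1, hk1, hm1⟩
      · exact absurd h1 (List.not_mem_nil)
      rcases h2 with h2 | ⟨j2, hj2, hk2, hm2⟩
      · exact absurd h2 (List.not_mem_nil)
      have e1 : j1 = j := by omega
      have e2 : j2 = j := by omega
      subst e1; subst e2
      exact List.any_eq_true.mpr ⟨p, hp, by simp [hm1, hm2]⟩
    · intro hbad
      rcases List.any_eq_true.mp hbad with ⟨p, hp, hc⟩
      obtain ⟨hc1, hc2⟩ : pvMember p.1 allCombL[j] = true ∧ pvMember p.2 allCombL[j] = true := by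
        simpa using hc
      refine Or.inr ⟨p, hp, ?_, ?_⟩ <;> rw [pvIndex_mem] <;>
        exact Or.inr ⟨j, hj, by omega, by assumption⟩
  cases hC : PySem.Set.contains (pvBad (pvIndex allCombL 0 PySem.Dict.empty) dislikePairs) (0 + j) <;>
    cases hP : pvBadComb dislikePairs allCombL[j] <;> simp_all

-- ===== VERDICT (by name: the statement is the Claim_ definition above) =====
theorem removeBadCombinations2_spec : Claim_equal_removeBadCombinations2 := by
  intro allCombL dislikePairs _
  unfold Spec_removeBadCombinations2
  rw [A_eq_filter, B_eq_filter]
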